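-- pv_equiv track=rewrite | github.com/hongyao1307/ECE650 | a1/a1ece650.py | intersect_insert_before_cor
-- ===== SOURCE A (Python) =====
-- def intersect_insert_before_cor(cors, cor, new_node):
--     if new_node in cors:
--         return cors
--     ref_max = 100
--     ref_counter = -1
--     for ref_val in range(1, ref_max):
--         if (new_node[0], new_node[1], ref_val) in cors:
--             cors.remove((new_node[0], new_node[1], ref_val))
--             ref_counter = ref_val
--             break
--     new_cors = []
--     i = 0
--     index = 0
--     for c in cors:
--         new_cors.append(c)
--         if c == cor:
--             index = i
--         i = i+1
--     if ref_counter < 0: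
--         new_cors.insert(index, (new_node[0], new_node[1], 1))
--     else:
--         new_cors.insert(index, (new_node[0], new_node[1], ref_counter+1))
--     return new_cors
-- ===== SOURCE B (Python) =====
-- def intersect_insert_before_cor(cors, cor, new_node):
--     # Note: A's `if new_node in cors` guard compares a 2-tuple against 3-tuples,
--     # so it is always False; B omits it. Like A, this mutates `cors` (remove).
--     x, y = new_node
--     matches = [c[2] for c in cors if c[0] == x and c[1] == y and 1 <= c[2] < 100]
--     if matches:
--         k = min(matches)
--         cors.remove((x, y, k))
--         new_val = k + 1
--     else:
--         new_val = 1
--     index = 0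
--     for i, c in enumerate(cors):
--         if c == cor:
--             index = i
--     out = list(cors)
--     out.insert(index, (x, y, new_val))
--     return out
-- ===== Notes on version B (the rewrite author's own statement) =====
-- stated objective: simpler
-- what changed: B replaces A's 99-iteration membership-probing loop (range(1,100) with an `in` scan each time) by one pass collecting the matching third components and taking their min, and replaces A's copy-while-tracking-index loop by a plain enumerate scan; A's dead `new_node in cors` guard (a 2-tuple never equals a 3-tuple) is dropped.
import Mathlib
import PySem

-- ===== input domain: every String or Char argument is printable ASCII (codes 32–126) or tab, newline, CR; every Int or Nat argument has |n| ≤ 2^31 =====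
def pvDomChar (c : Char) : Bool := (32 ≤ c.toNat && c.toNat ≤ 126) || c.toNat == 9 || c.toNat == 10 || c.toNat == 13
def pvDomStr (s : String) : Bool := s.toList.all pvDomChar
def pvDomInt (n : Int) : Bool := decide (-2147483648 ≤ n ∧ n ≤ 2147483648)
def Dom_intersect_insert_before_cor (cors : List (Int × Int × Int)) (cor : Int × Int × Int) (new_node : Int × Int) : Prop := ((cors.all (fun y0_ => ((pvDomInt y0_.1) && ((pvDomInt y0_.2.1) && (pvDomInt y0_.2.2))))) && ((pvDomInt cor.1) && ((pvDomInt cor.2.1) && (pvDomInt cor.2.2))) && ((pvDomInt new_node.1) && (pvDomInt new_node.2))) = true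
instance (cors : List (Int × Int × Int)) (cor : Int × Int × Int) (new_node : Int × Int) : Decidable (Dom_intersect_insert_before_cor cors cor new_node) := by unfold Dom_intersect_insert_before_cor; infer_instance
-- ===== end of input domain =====

-- B replaces A's 99-probe membership loop by a single scan taking the minimum matching
-- third component, and the copy-and-track loop by an enumerate scan (objective: simpler).
-- Python A and B both mutate `cors` in place (the same .remove); the claim is about the return value.

-- ===== PORT A =====
-- A's `for ref_val in range(1, 100): if (x, y, ref_val) in cors: remove; break` loop.
def pvProbe (cors : List (Int × Int × Int)) (x y : Int) : List Int → Option Int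
  | [] => none
  | v :: rest => if (x, y, v) ∈ cors then some v else pvProbe cors x y rest

-- A's `if new_node in cors: return cors` guard compares a 2-tuple with 3-tuples,
-- which is always False in Python for these argument types; omitting it is exact.
def intersect_insert_before_cor (cors : List (Int × Int × Int)) (cor : Int × Int × Int) (new_node : Int × Int) : List (Int × Int × Int) :=
  let (cors2, refCounter) :=
    match pvProbe cors new_node.1 new_node.2 (PySem.List.pyRange 1 100 1) with
    | some v => ((PySem.List.remove? cors (new_node.1, new_node.2, v)).getD cors, v)
    | none => (cors, (-1 : Int))
  -- the copy-and-track loop: new_cors, i, index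
  let st := cors2.foldl
    (fun (s : List (Int × Int × Int) × Int × Int) c =>
      (s.1 ++ [c], s.2.1 + 1, if c = cor then s.2.1 else s.2.2)) ([], 0, 0)
  if refCounter < 0 then PySem.List.insert st.1 st.2.2 (new_node.1, new_node.2, 1)
  else PySem.List.insert st.1 st.2.2 (new_node.1, new_node.2, refCounter + 1)

-- ===== PORT B =====
def intersect_insert_before_cor_alt (cors : List (Int × Int × Int)) (cor : Int × Int × Int) (new_node : Int × Int) : List (Int × Int × Int) :=
  let x := new_node.1
  let y := new_node.2
  let vals := (cors.filter (fun c => c.1 = x ∧ c.2.1 = y ∧ 1 ≤ c.2.2 ∧ c.2.2 < 100)).map (·.2.2)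
  let (cors2, newVal) :=
    match PySem.List.min? vals (fun v => v) with
    | some k => ((PySem.List.remove? cors (x, y, k)).getD cors, k + 1)
    | none => (cors, (1 : Int))
  let index := (PySem.List.enumerate cors2 0).foldl
    (fun idx p => if p.2 = cor then p.1 else idx) (0 : Int)
  PySem.List.insert cors2 index (x, y, newVal)

-- ===== PRECONDITION & SPEC =====
def Spec_intersect_insert_before_cor (cors : List (Int × Int × Int)) (cor : Int × Int × Int) (new_node : Int × Int) (out : List (Int × Int × Int)) : Prop := out = intersect_insert_before_cor_alt cors cor new_node
instance (cors : List (Int × Int × Int)) (cor : Int × Int × Int) (new_node : Int × Int) (out : List (Int × Int × Int)) : Decidable (Spec_intersect_insert_before_cor cors cor new_node out) := by unfold Spec_intersect_insert_before_cor; infer_instance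

-- ===== CLAIM (what is proved, stated in full; the proofs are below) =====
def Claim_equal_intersect_insert_before_cor : Prop := ∀ (cors : List (Int × Int × Int)) (cor : Int × Int × Int) (new_node : Int × Int), Dom_intersect_insert_before_cor cors cor new_node → Spec_intersect_insert_before_cor cors cor new_node (intersect_insert_before_cor cors cor new_node)

-- ===== LEMMAS AND PROOFS =====

-- probe returns none iff no probed value is present
theorem pvProbe_eq_none {cors : List (Int × Int × Int)} {x y : Int} {L : List Int} :
    pvProbe cors x y L = none ↔ ∀ u ∈ L, (x, y, u) ∉ cors := by
  induction L with
  | nil => simp [pvProbe]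
  | cons v rest ih =>
    simp only [pvProbe]
    split_ifs with h
    · simp [h]
    · simpa [h] using ih

-- on an ascending probe list, probe returns the least present value
theorem pvProbe_eq_some {cors : List (Int × Int × Int)} {x y v : Int} {L : List Int}
    (hL : L.Pairwise (· < ·)) (h : pvProbe cors x y L = some v) :
    v ∈ L ∧ (x, y, v) ∈ cors ∧ ∀ u ∈ L, (x, y, u) ∈ cors → v ≤ u := by
  induction L with
  | nil => simp [pvProbe] at h
  | cons w rest ih =>
    simp only [pvProbe] at h
    rcases List.pairwise_cons.mp hL with ⟨hw, hrest⟩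
    split_ifs at h with hmem
    · cases h
      refine ⟨List.mem_cons_self, hmem, ?_⟩
      intro u hu _
      rcases List.mem_cons.mp hu with rfl | hu
      · exact le_refl _
      · exact le_of_lt (hw u hu)
    · rcases ih hrest h with ⟨h1, h2, h3⟩
      refine ⟨List.mem_cons_of_mem _ h1, h2, ?_⟩
      intro u hu hc
      rcases List.mem_cons.mp hu with rfl | hu
      · exact absurd hc hmem
      · exact h3 u hu hc

-- membership in B's filtered value list
theorem mem_matches {cors : List (Int × Int × Int)} {x y v : Int} :
    v ∈ (cors.filter (fun c => c.1 = x ∧ c.2.1 = y ∧ 1 ≤ c.2.2 ∧ c.2.2 < 100)).map (·.2.2) ↔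
    (x, y, v) ∈ cors ∧ 1 ≤ v ∧ v < 100 := by
  constructor
  · intro h
    rcases List.mem_map.mp h with ⟨c, hc, rfl⟩
    rcases List.mem_filter.mp hc with ⟨hmem, hp⟩
    simp only [decide_eq_true_eq] at hp
    obtain ⟨h1, h2, h3, h4⟩ := hp
    refine ⟨?_, h3, h4⟩
    have : c = (x, y, c.2.2) := by
      cases c with | mk a bc => cases bc with | mk b cc => simp_all
    rwa [this] at hmem
  · rintro ⟨hmem, h1, h2⟩
    exact List.mem_map.mpr ⟨(x, y, v), List.mem_filter.mpr ⟨hmem, by simp [h1, h2]⟩, rfl⟩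

-- A's probe over range(1, 100) computes B's min over the matching values
theorem probe_eq_min (cors : List (Int × Int × Int)) (x y : Int) :
    pvProbe cors x y (PySem.List.pyRange 1 100 1) =
    PySem.List.min? ((cors.filter (fun c => c.1 = x ∧ c.2.1 = y ∧ 1 ≤ c.2.2 ∧ c.2.2 < 100)).map (·.2.2)) (fun v => v) := by
  set M := (cors.filter (fun c => c.1 = x ∧ c.2.1 = y ∧ 1 ≤ c.2.2 ∧ c.2.2 < 100)).map (·.2.2) with hM
  cases hp : pvProbe cors x y (PySem.List.pyRange 1 100 1) with
  | none =>
    cases hm : PySem.List.min? M (fun v => v) with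
    | none => rfl
    | some m =>
      exfalso
      have hmem : m ∈ M := PySem.List.min?_mem hm
      rcases mem_matches.mp hmem with ⟨hc, h1, h2⟩
      exact (pvProbe_eq_none.mp hp) m
        (PySem.List.mem_pyRange_one.mpr ⟨h1, h2⟩) hc
  | some v =>
    rcases pvProbe_eq_some (PySem.List.pairwise_lt_pyRange_one 1 100) hp with ⟨hvL, hvc, hleast⟩
    rcases PySem.List.mem_pyRange_one.mp hvL with ⟨hv1, hv2⟩
    have hvM : v ∈ M := mem_matches.mpr ⟨hvc, hv1, hv2⟩
    cases hm : PySem.List.min? M (fun v => v) with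
    | none =>
      exfalso
      cases hMc : M with
      | nil => rw [hMc] at hvM; simp at hvM
      | cons a t => rw [hMc, PySem.List.min?_id_cons] at hm; simp at hm
    | some m =>
      have hmM : m ∈ M := PySem.List.min?_mem hm
      rcases mem_matches.mp hmM with ⟨hc, h1, h2⟩
      have h1' : v ≤ m := hleast m (PySem.List.mem_pyRange_one.mpr ⟨h1, h2⟩) hc
      have h2' : m ≤ v := PySem.List.min?_isMin hm v hvM
      exact congrArg some (le_antisymm h1' h2')

-- A's copy-and-track fold computes (copy, length, last index of cor) = B's enumerate fold
theorem foldl_track (cor : Int × Int × Int) (l : List (Int × Int × Int))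
    (acc : List (Int × Int × Int)) (i idx : Int) :
    l.foldl (fun (s : List (Int × Int × Int) × Int × Int) c =>
        (s.1 ++ [c], s.2.1 + 1, if c = cor then s.2.1 else s.2.2)) (acc, i, idx) =
    (acc ++ l, i + l.length,
      (PySem.List.enumerate l i).foldl (fun idx p => if p.2 = cor then p.1 else idx) idx) := by
  induction l generalizing acc i idx with
  | nil => simp
  | cons c rest ih =>
    rw [List.foldl_cons, ih, PySem.List.enumerate_cons, List.foldl_cons]
    simp only [Prod.mk.injEq]
    refine ⟨by simp, by push_cast [List.length_cons]; omega, by simp⟩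

-- ===== VERDICT (by name: the statement is the Claim_ definition above) =====
theorem intersect_insert_before_cor_spec : Claim_equal_intersect_insert_before_cor := by
  intro cors cor new_node _
  unfold Spec_intersect_insert_before_cor intersect_insert_before_cor intersect_insert_before_cor_alt
  rw [probe_eq_min cors new_node.1 new_node.2]
  cases hm : PySem.List.min? ((cors.filter (fun c => c.1 = new_node.1 ∧ c.2.1 = new_node.2 ∧ 1 ≤ c.2.2 ∧ c.2.2 < 100)).map (·.2.2)) (fun v => v) with
  | none =>
    simp only [Bool.decide_and] at hm ⊢
    simp only [hm, foldl_track]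
    norm_num
  | some k =>
    have hk : (1 : Int) ≤ k := by
      have := mem_matches.mp (PySem.List.min?_mem hm)
      exact this.2.1
    simp only [Bool.decide_and] at hm ⊢
    simp only [hm, foldl_track]
    have : ¬ (k < 0) := by omega
    simp [this]
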